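-- pv_equiv track=rewrite | github.com/pypi-data/pypi-mirror-286 | packages/amolkit/amolkit-1.0.14-py3-none-any.whl/amolkit/stringmanip.py | renumber
-- ===== SOURCE A (Python) =====
-- def renumber(prevname,bio=True):
--     #atomsymbol=atomsymbol_by_atomname(atomname,bio)
--     #atomname=list(map(lambda x:gei.atomsymbol_by_atomname(x[0:4].strip(),bio),prevname))
--     atomname=list(map(lambda x:x[0:4].strip(),prevname))
--     collect={}
--     newname=[None]*len(atomname)
--     for i,a in enumerate(atomname):
--         if a not in collect.keys():
--             collect[a]=[i]
--         else:
--             collect[a].append(i)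
--     for key,value in collect.items():
--         i=0
--         if len(value)==1:
--             newname[value[0]]=key
--             continue
--         if len(str(len(value)))>=5:
--             raise Exception("Cannot handle molecules with more than 9999 non-unique atom names")
--         if len(key)+len(str(len(value)))>5:
--             trunc=5-len(str(len(value)))
--             #print (trunc)
--             newkey=key[0:trunc]
--             if newkey in collect.keys():
--                 i=len(collect[newkey])
--         else:
--             newkey=key
--         for v in value:
--             i=i+1
--             newname[v]=newkey+str(i)
--
--     return newname
-- ===== SOURCE B (Python) =====
-- def renumber(prevname, bio=True):
--     names = [p[0:4].strip() for p in prevname]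
--     counts = {}
--     for a in names:
--         counts[a] = counts.get(a, 0) + 1
--     nxt = {}
--     out = []
--     for a in names:
--         c = counts[a]
--         if c == 1:
--             out.append(a)
--             continue
--         if len(str(c)) >= 5:
--             raise Exception("Cannot handle molecules with more than 9999 non-unique atom names")
--         if len(a) + len(str(c)) > 5:
--             newkey = a[0:5 - len(str(c))]
--         else:
--             newkey = a
--         if a not in nxt:
--             nxt[a] = counts.get(newkey, 0) if newkey != a else 0
--         nxt[a] += 1
--         out.append(newkey + str(nxt[a]))
--     return out
-- ===== Notes on version B (the rewrite author's own statement) =====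
-- stated objective: simpler
-- what changed: Replaced A's two-phase group-by (dict of index lists, then per-group writes into a preallocated slot list) with a single pass over the truncated names that emits output in order, using a precomputed count dict and a running per-name counter initialized from the truncated-prefix count.
import Mathlib
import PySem

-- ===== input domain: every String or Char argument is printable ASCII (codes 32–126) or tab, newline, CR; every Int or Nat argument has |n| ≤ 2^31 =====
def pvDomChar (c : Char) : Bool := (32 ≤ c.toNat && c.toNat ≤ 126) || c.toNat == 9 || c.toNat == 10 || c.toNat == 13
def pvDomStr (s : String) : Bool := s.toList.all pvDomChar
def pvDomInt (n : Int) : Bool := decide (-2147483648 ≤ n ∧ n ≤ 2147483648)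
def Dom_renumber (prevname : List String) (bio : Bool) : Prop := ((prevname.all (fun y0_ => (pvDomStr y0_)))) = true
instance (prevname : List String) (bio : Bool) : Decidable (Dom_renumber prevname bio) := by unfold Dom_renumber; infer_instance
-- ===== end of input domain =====

-- B replaces A's two-phase group-by (dict of index lists, then per-group writes into a
-- preallocated slot list) with a single ordered pass over the truncated names driven by a
-- count dict and a running per-name counter (objective: simpler).

-- ===== PORT A =====
-- x[0:4].strip()  (shared truncation helper; the identical expression occurs in A and B)
def pvTrunc (x : String) : String := PySem.Str.strip (PySem.Str.slice x (some 0) (some 4))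

-- the body of A's first loop: collect[a] gets index i appended (created on first sight)
def stepCollect (d : PySem.Dict String (List Nat)) (p : String × Nat) : PySem.Dict String (List Nat) :=
  match d.get? p.1 with
  | none => d.insert p.1 [p.2]
  | some l => d.insert p.1 (l ++ [p.2])

-- the body of A's innermost loop: i=i+1; newname[v]=newkey+str(i)
def stepWrite (newkey : String) (st : List (Option String) × Int) (v : Nat) : List (Option String) × Int :=
  (st.1.set v (some (newkey ++ PySem.Int.toStr (st.2 + 1))), st.2 + 1)

-- the body of A's second loop, one (key, value) group
def stepGroup (collect : PySem.Dict String (List Nat)) (nn : List (Option String)) (kv : String × List Nat) : List (Option String) :=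
  let key := kv.1
  let value := kv.2
  if value.length == 1 then nn.set (value.headD 0) (some key)
  else
    let c : Int := (value.length : Int)
    let ls := PySem.Str.len (PySem.Int.toStr c)
    if 5 ≤ ls then nn   -- Python raises here; Pre_renumber excludes these inputs
    else
      let p :=
        if 5 < PySem.Str.len key + ls then
          let nk := PySem.Str.slice key (some 0) (some (5 - ls))
          match collect.get? nk with
          | some l => (nk, (l.length : Int))
          | none => (nk, (0 : Int))
        else (key, (0 : Int))
      (value.foldl (stepWrite p.1) (nn, p.2)).1

def renumber (prevname : List String) (bio : Bool) : List String :=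
  let atomname := prevname.map pvTrunc
  let collect := atomname.zipIdx.foldl stepCollect PySem.Dict.empty
  let newname := collect.items.foldl (stepGroup collect) (List.replicate atomname.length none)
  newname.map (fun o => o.getD "")

-- ===== PORT B =====
-- the body of B's counting loop: counts[a] = counts.get(a, 0) + 1
def stepCount (d : PySem.Dict String Int) (a : String) : PySem.Dict String Int :=
  d.insert a (d.getD a 0 + 1)

-- the body of B's single output loop
def stepB (counts : PySem.Dict String Int) (st : PySem.Dict String Int × List String) (a : String) : PySem.Dict String Int × List String :=
  let c := counts.getD a 0
  if c == 1 then (st.1, st.2 ++ [a])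
  else
    let ls := PySem.Str.len (PySem.Int.toStr c)
    if 5 ≤ ls then st   -- Python raises here; Pre_renumber excludes these inputs
    else
      let newkey := if 5 < PySem.Str.len a + ls then PySem.Str.slice a (some 0) (some (5 - ls)) else a
      let i0 : Int :=
        match st.1.get? a with
        | some v => v
        | none => if newkey == a then 0 else counts.getD newkey 0
      (st.1.insert a (i0 + 1), st.2 ++ [newkey ++ PySem.Int.toStr (i0 + 1)])

def renumber_alt (prevname : List String) (bio : Bool) : List String :=
  let names := prevname.map pvTrunc
  let counts := names.foldl stepCount PySem.Dict.empty
  (names.foldl (stepB counts) (PySem.Dict.empty, [])).2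

-- ===== PRECONDITION & SPEC =====
-- Pre_ excludes exactly the inputs on which A raises: some truncated name occurs at least
-- 10000 times (len(str(count)) >= 5), the explicit `raise` in A (B raises there too).
def Pre_renumber (prevname : List String) (bio : Bool) : Prop :=
  ∀ s ∈ prevname,
    PySem.Str.len (PySem.Int.toStr
      (((prevname.map (fun x => PySem.Str.strip (PySem.Str.slice x (some 0) (some 4)))).count
        (PySem.Str.strip (PySem.Str.slice s (some 0) (some 4))) : Nat) : Int)) < 5
instance (prevname : List String) (bio : Bool) : Decidable (Pre_renumber prevname bio) := by unfold Pre_renumber; infer_instance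

def pvWitness_renumber : List String × Bool := (["CA", "CA", "N"], true)

def Spec_renumber (prevname : List String) (bio : Bool) (out : List String) : Prop := out = renumber_alt prevname bio
instance (prevname : List String) (bio : Bool) (out : List String) : Decidable (Spec_renumber prevname bio out) := by unfold Spec_renumber; infer_instance

-- ===== CLAIM (what is proved, stated in full; the proofs are below) =====
def Claim_equal_renumber : Prop := ∀ (prevname : List String) (bio : Bool), Dom_renumber prevname bio → Pre_renumber prevname bio → Spec_renumber prevname bio (renumber prevname bio)

-- ===== LEMMAS AND PROOFS =====

-- the common semantic skeleton: digit length, truncated key, offset, and the value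
-- pvG ns j that position j of the output must carry
def pvLS (c : Nat) : Int := PySem.Str.len (PySem.Int.toStr (c : Int))

def pvNK (a : String) (c : Nat) : String :=
  if 5 < PySem.Str.len a + pvLS c then PySem.Str.slice a (some 0) (some (5 - pvLS c)) else a

def pvOff (ns : List String) (a : String) : Int :=
  if 5 < PySem.Str.len a + pvLS (ns.count a) then ((ns.count (pvNK a (ns.count a)) : Nat) : Int) else 0

def pvG (ns : List String) (j : Nat) : String :=
  let a := ns.getD j ""
  if ns.count a = 1 then a
  else pvNK a (ns.count a) ++ PySem.Int.toStr (pvOff ns a + (((ns.take (j + 1)).count a : Nat) : Int))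

def pvKeys (l : List String) : List String :=
  l.foldl (fun acc a => if a ∈ acc then acc else acc ++ [a]) []

def pvVals (ps : List (String × Nat)) (a : String) : List Nat :=
  (ps.filter (fun p => p.1 == a)).map Prod.snd

def pvIdxs (ns : List String) (a : String) : List Nat := pvVals ns.zipIdx a

-- ---- generic small facts ----

theorem pv_map_fst_zipIdx {α : Type} (l : List α) (k : Nat) : (l.zipIdx k).map Prod.fst = l := by
  induction l generalizing k with
  | nil => simp
  | cons x t ih => simp [List.zipIdx_cons, ih]

theorem pv_idxOf_append_not_mem {α : Type} [BEq α] [LawfulBEq α] (u v : List α) (a : α)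
    (h : a ∉ u) : (u ++ v).idxOf a = u.length + v.idxOf a := by
  induction u with
  | nil => simp
  | cons b t ih =>
    simp only [List.mem_cons, not_or] at h
    rw [List.cons_append, List.idxOf_cons_ne _ (fun hba => h.1 hba.symm), ih h.2]
    simp [Nat.succ_eq_add_one]
    omega

theorem pv_keys_snoc (l : List String) (x : String) :
    pvKeys (l ++ [x]) = if x ∈ pvKeys l then pvKeys l else pvKeys l ++ [x] := by
  simp [pvKeys, List.foldl_append]

theorem pv_mem_keys (l : List String) : ∀ a, a ∈ pvKeys l ↔ a ∈ l := by
  induction l using List.reverseRecOn with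
  | nil => simp [pvKeys]
  | append_singleton l x ih =>
    intro a
    rw [pv_keys_snoc]
    by_cases h : x ∈ pvKeys l
    · rw [if_pos h]
      constructor
      · intro ha; exact List.mem_append_left _ ((ih a).mp ha)
      · intro ha
        rcases List.mem_append.mp ha with ha | ha
        · exact (ih a).mpr ha
        · rw [List.mem_singleton] at ha; subst ha; exact h
    · rw [if_neg h]
      simp [List.mem_append, ih a]

theorem pv_vals_snoc (ps : List (String × Nat)) (p : String × Nat) (a : String) :
    pvVals (ps ++ [p]) a = pvVals ps a ++ (if p.1 == a then [p.2] else []) := by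
  cases h : p.1 == a <;> simp [pvVals, List.filter_append, h]

theorem pv_vals_nil_of_not_mem (ps : List (String × Nat)) (a : String)
    (h : a ∉ ps.map Prod.fst) : pvVals ps a = [] := by
  simp only [pvVals, List.map_eq_nil_iff, List.filter_eq_nil_iff]
  intro p hp hpa
  exact h (List.mem_map.mpr ⟨p, hp, by simpa using hpa⟩)

theorem pv_find_mapkeys (K : List String) (v : String → List Nat) (a : String) :
    List.find? (fun q => q.1 == a) (K.map fun b => (b, v b)) = if a ∈ K then some (a, v a) else none := by
  induction K with
  | nil => simp
  | cons b K ih =>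
    by_cases hb : b = a
    · subst hb; simp
    · simp [List.find?_cons, hb, ih, Ne.symm hb]

theorem pv_any_eq_find {κ ν : Type} [BEq κ] (l : List (κ × ν)) (k : κ) :
    (l.any fun p => p.1 == k) = (List.find? (fun p => p.1 == k) l).isSome := by
  induction l with
  | nil => rfl
  | cons p t ih => cases hp : (p.1 == k) <;> simp [List.find?_cons, hp, ih]

theorem pv_items_insert_pos {κ ν : Type} [BEq κ] (d : PySem.Dict κ ν) (k : κ) (v : ν)
    (h : d.contains k = true) :
    (d.insert k v).items = d.items.map (fun p => if p.1 == k then (k, v) else p) := by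
  simp [PySem.Dict.insert, h]

theorem pv_items_insert_neg {κ ν : Type} [BEq κ] (d : PySem.Dict κ ν) (k : κ) (v : ν)
    (h : d.contains k = false) :
    (d.insert k v).items = d.items ++ [(k, v)] := by
  simp [PySem.Dict.insert, h]

theorem pv_contains_eq {κ ν : Type} [BEq κ] (d : PySem.Dict κ ν) (k : κ) :
    d.contains k = (d.get? k).isSome := by
  show (d.items.any fun p => p.1 == k) = _
  rw [pv_any_eq_find, PySem.Dict.get?, Option.isSome_map]

-- ---- characterization of A's collect dict ----

theorem pv_collect_items (ps : List (String × Nat)) :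
    (ps.foldl stepCollect PySem.Dict.empty).items =
      (pvKeys (ps.map Prod.fst)).map (fun a => (a, pvVals ps a)) := by
  induction ps using List.reverseRecOn with
  | nil => simp [pvKeys, pvVals]; rfl
  | append_singleton ps p ih =>
    rw [List.foldl_append, List.foldl_cons, List.foldl_nil]
    have hget : (ps.foldl stepCollect PySem.Dict.empty).get? p.1 =
        if p.1 ∈ pvKeys (ps.map Prod.fst) then some (pvVals ps p.1) else none := by
      unfold PySem.Dict.get?
      rw [ih, pv_find_mapkeys]
      split <;> simp
    by_cases hm : p.1 ∈ pvKeys (ps.map Prod.fst)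
    · rw [if_pos hm] at hget
      have hstep : stepCollect (ps.foldl stepCollect PySem.Dict.empty) p =
          (ps.foldl stepCollect PySem.Dict.empty).insert p.1 (pvVals ps p.1 ++ [p.2]) := by
        rw [stepCollect.eq_def, hget]
      rw [hstep]
      have hc : (ps.foldl stepCollect PySem.Dict.empty).contains p.1 = true := by
        rw [pv_contains_eq, hget]; rfl
      rw [pv_items_insert_pos _ _ _ hc]
      rw [ih, List.map_map, List.map_append]
      simp only [List.map_cons, List.map_nil]
      rw [pv_keys_snoc, if_pos (by simpa using hm)]
      apply List.map_congr_left
      intro b _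
      by_cases hb : b = p.1
      · subst hb; simp [pv_vals_snoc]
      · simp [Function.comp, pv_vals_snoc, beq_false_of_ne (fun h => hb h.symm), beq_false_of_ne hb]
    · rw [if_neg hm] at hget
      have hstep : stepCollect (ps.foldl stepCollect PySem.Dict.empty) p =
          (ps.foldl stepCollect PySem.Dict.empty).insert p.1 [p.2] := by
        rw [stepCollect.eq_def, hget]
      rw [hstep]
      have hc : (ps.foldl stepCollect PySem.Dict.empty).contains p.1 = false := by
        rw [pv_contains_eq, hget]; rfl
      rw [pv_items_insert_neg _ _ _ hc]
      rw [ih, List.map_append]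
      simp only [List.map_cons, List.map_nil]
      rw [pv_keys_snoc, if_neg (by simpa using hm), List.map_append]
      congr 1
      · apply List.map_congr_left
        intro b hb
        have hbp : b ≠ p.1 := fun h => hm (h ▸ hb)
        simp [pv_vals_snoc, beq_false_of_ne (fun h => hbp h.symm)]
      · have hnm : p.1 ∉ ps.map Prod.fst := fun h => hm ((pv_mem_keys _ _).mpr h)
        simp [pv_vals_snoc, pv_vals_nil_of_not_mem ps p.1 hnm]

theorem pv_get_final (ns : List String) (b : String) :
    (ns.zipIdx.foldl stepCollect PySem.Dict.empty).get? b =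
      if b ∈ ns then some (pvIdxs ns b) else none := by
  unfold PySem.Dict.get?
  rw [pv_collect_items, pv_map_fst_zipIdx, pv_find_mapkeys]
  split <;> simp_all [pv_mem_keys, pvIdxs]

-- ---- facts about the index lists ----

theorem pv_idxs_snoc (l : List String) (x a : String) :
    pvIdxs (l ++ [x]) a = pvIdxs l a ++ (if x == a then [l.length] else []) := by
  have hz : (l ++ [x]).zipIdx = l.zipIdx ++ [(x, l.length)] := by
    rw [List.zipIdx_append]; simp [List.zipIdx_cons]
  rw [pvIdxs, hz, pv_vals_snoc]
  rfl

theorem pv_idxs_len (l : List String) (a : String) : (pvIdxs l a).length = l.count a := by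
  induction l using List.reverseRecOn with
  | nil => simp [pvIdxs, pvVals]
  | append_singleton l x ih =>
    cases hx : x == a <;>
      simp [pv_idxs_snoc, hx, List.count_append, ih, List.count_cons, List.count_nil]

theorem pv_idxs_mem (l : List String) (a : String) : ∀ j, j ∈ pvIdxs l a ↔ l[j]? = some a := by
  induction l using List.reverseRecOn with
  | nil => simp [pvIdxs, pvVals]
  | append_singleton l x ih =>
    intro j
    rw [pv_idxs_snoc, List.mem_append]
    by_cases hj : j < l.length
    · rw [List.getElem?_append_left hj, ← ih j]
      have hnot : j ∉ (if (x == a) = true then [l.length] else []) := by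
        split
        · simp; omega
        · simp
      tauto
    · have h1 : j ∉ pvIdxs l a := fun h =>
        hj ((List.getElem?_eq_some_iff.mp ((ih j).mp h)).1)
      by_cases hj2 : j = l.length
      · subst hj2
        rw [List.getElem?_append_right (le_refl _)]
        simp only [Nat.sub_self]
        have hx0 : ([x])[0]? = some x := rfl
        rw [hx0]
        cases hx : x == a
        · rw [if_neg (by simp [hx])]
          constructor
          · rintro (h | h)
            · exact absurd h h1
            · simp at h
          · intro h
            rw [Option.some_inj] at h
            rw [h] at hx
            simp at hx
        · have hxa : x = a := by simpa using hx
          subst hxa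
          simp [h1]
      · have hnone : (l ++ [x])[j]? = none := by
          apply List.getElem?_eq_none
          simp; omega
        rw [hnone]
        have h2 : j ∉ (if (x == a) = true then [l.length] else []) := by
          split
          · simp; omega
          · simp
        simp [h1, h2]
        exact fun _ => hj2

theorem pv_idxs_lt (l : List String) (a : String) (j : Nat) (h : j ∈ pvIdxs l a) : j < l.length :=
  (List.getElem?_eq_some_iff.mp ((pv_idxs_mem l a j).mp h)).1

theorem pv_idxs_nodup (l : List String) (a : String) : (pvIdxs l a).Nodup := by
  induction l using List.reverseRecOn with
  | nil => simp [pvIdxs, pvVals]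
  | append_singleton l x ih =>
    rw [pv_idxs_snoc]
    cases hx : x == a
    · simpa using ih
    · simp only [List.nodup_append]
      refine ⟨ih, by simp, ?_⟩
      intro j hj
      have := pv_idxs_lt l a j hj
      simp; omega

theorem pv_idxs_idxOf (l : List String) (a : String) (j : Nat) (h : l[j]? = some a) :
    (pvIdxs l a).idxOf j = (l.take j).count a := by
  induction l using List.reverseRecOn with
  | nil => simp at h
  | append_singleton l x ih =>
    by_cases hj : j < l.length
    · have hl : l[j]? = some a := by rw [List.getElem?_append_left hj] at h; exact h
      have hmem : j ∈ pvIdxs l a := (pv_idxs_mem l a j).mpr hl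
      rw [pv_idxs_snoc, List.idxOf_append_of_mem hmem, List.take_append_of_le_length (by omega), ih hl]
    · have hj2 : j = l.length := by
        by_contra hne
        have hnone : (l ++ [x])[j]? = none := by
          apply List.getElem?_eq_none; simp; omega
        rw [hnone] at h; simp at h
      subst hj2
      rw [List.getElem?_append_right (le_refl _)] at h
      simp only [Nat.sub_self] at h
      have hx : x = a := by
        have : ([x])[0]? = some x := rfl
        rw [this] at h; exact Option.some_inj.mp h
      have hnm : l.length ∉ pvIdxs l a := fun hm => absurd (pv_idxs_lt l a _ hm) (lt_irrefl _)
      rw [pv_idxs_snoc, hx]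
      simp only [beq_self_eq_true, if_pos]
      rw [pv_idxOf_append_not_mem _ _ _ hnm, List.idxOf_cons_self, List.take_append_of_le_length (le_refl _)]
      simp [pv_idxs_len, List.take_length]

-- ---- A's inner write loop ----

theorem pv_write_len (nk : String) (value : List Nat) :
    ∀ (nn : List (Option String)) (i0 : Int), ((value.foldl (stepWrite nk) (nn, i0)).1).length = nn.length := by
  induction value with
  | nil => intro nn i0; rfl
  | cons v t ih =>
    intro nn i0
    rw [List.foldl_cons]
    rw [show (stepWrite nk (nn, i0) v) = (nn.set v (some (nk ++ PySem.Int.toStr (i0 + 1))), i0 + 1) from rfl]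
    rw [ih _ _, List.length_set]

theorem pv_write_get_notmem (nk : String) (value : List Nat) :
    ∀ (nn : List (Option String)) (i0 : Int) (j : Nat), j ∉ value →
      ((value.foldl (stepWrite nk) (nn, i0)).1)[j]? = nn[j]? := by
  induction value with
  | nil => intro nn i0 j _; rfl
  | cons v t ih =>
    intro nn i0 j hj
    rw [List.foldl_cons]
    have h1 : j ∉ t := fun h => hj (List.mem_cons_of_mem _ h)
    have h2 : j ≠ v := fun h => hj (h ▸ List.mem_cons_self)
    rw [show (stepWrite nk (nn, i0) v) = (nn.set v (some (nk ++ PySem.Int.toStr (i0 + 1))), i0 + 1) from rfl]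
    rw [ih _ _ _ h1, List.getElem?_set_ne (fun h => h2 h.symm)]

theorem pv_write_get_mem (nk : String) (value : List Nat) :
    ∀ (nn : List (Option String)) (i0 : Int) (j : Nat), value.Nodup → (∀ v ∈ value, v < nn.length) →
      j ∈ value →
      ((value.foldl (stepWrite nk) (nn, i0)).1)[j]? =
        some (some (nk ++ PySem.Int.toStr (i0 + ((value.idxOf j : Nat) : Int) + 1))) := by
  induction value with
  | nil => intro nn i0 j _ _ h; simp at h
  | cons v t ih =>
    intro nn i0 j hnd hlt hj
    have hvn : v ∉ t := by simp at hnd; exact hnd.1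
    have hnt : t.Nodup := by simp at hnd; exact hnd.2
    rw [List.foldl_cons]
    rw [show (stepWrite nk (nn, i0) v) = (nn.set v (some (nk ++ PySem.Int.toStr (i0 + 1))), i0 + 1) from rfl]
    by_cases hjv : j = v
    · subst hjv
      rw [pv_write_get_notmem nk t _ _ _ hvn]
      rw [List.getElem?_set_self (hlt j List.mem_cons_self)]
      simp [List.idxOf_cons_self]
    · have hjt : j ∈ t := by
        rcases List.mem_cons.mp hj with h | h
        · exact absurd h hjv
        · exact h
      rw [ih _ _ _ hnt (fun w hw => by rw [List.length_set]; exact hlt w (List.mem_cons_of_mem _ hw)) hjt]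
      have harith : i0 + 1 + ((t.idxOf j : Nat) : Int) + 1 = i0 + (((v :: t).idxOf j : Nat) : Int) + 1 := by
        rw [List.idxOf_cons_ne _ (fun h => hjv h.symm)]
        push_cast [Nat.succ_eq_add_one]
        ring
      rw [harith]

-- ---- A's outer group loop ----

theorem pv_stepGroup_len (c : PySem.Dict String (List Nat)) (nn : List (Option String)) (kv : String × List Nat) :
    (stepGroup c nn kv).length = nn.length := by
  rw [stepGroup.eq_def]
  dsimp only
  split
  · simp
  · split
    · rfl
    · exact pv_write_len _ _ _ _

theorem pv_group_fold_len (c : PySem.Dict String (List Nat)) (items : List (String × List Nat)) :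
    ∀ nn, (items.foldl (stepGroup c) nn).length = nn.length := by
  induction items with
  | nil => intro nn; rfl
  | cons kv t ih => intro nn; rw [List.foldl_cons, ih, pv_stepGroup_len]

-- ---- string facts: the truncated key is a different string ----

theorem pv_slice_len (s : String) (m : Int) (h0 : 0 ≤ m) :
    (PySem.Str.slice s (some 0) (some m)).toList.length = min m.toNat s.toList.length := by
  have hm : ¬ (m < 0) := not_lt.mpr h0
  simp [pysem, PySem.List.slice, PySem.List.clampIdx, hm]

theorem pv_nk_ne (a : String) (c : Nat) (h4 : pvLS c < 5) (h5 : 5 < PySem.Str.len a + pvLS c) :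
    pvNK a c ≠ a := by
  intro he
  unfold pvNK at he
  rw [if_pos h5] at he
  have h0 : (0 : Int) ≤ pvLS c := by
    show (0 : Int) ≤ PySem.Str.len _
    simp [PySem.Str.len]
  have hlen := congrArg (fun s => s.toList.length) he
  simp only at hlen
  rw [pv_slice_len a _ (by omega)] at hlen
  have hL : (5 : Int) < (a.toList.length : Int) + pvLS c := by
    simpa [PySem.Str.len] using h5
  omega

-- ---- B's counting dict ----

theorem pv_counts_get (l : List String) (a : String) :
    (l.foldl stepCount PySem.Dict.empty).get? a = if a ∈ l then some ((l.count a : Nat) : Int) else none := by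
  induction l using List.reverseRecOn with
  | nil => simp
  | append_singleton l x ih =>
    rw [List.foldl_append, List.foldl_cons, List.foldl_nil]
    rw [stepCount.eq_def, PySem.Dict.get?_insert]
    by_cases hax : a = x
    · subst hax
      rw [if_pos rfl]
      have hgd : (l.foldl stepCount PySem.Dict.empty).getD a 0 = ((l.count a : Nat) : Int) := by
        unfold PySem.Dict.getD
        rw [ih]
        split
        · rfl
        · next h => rw [List.count_eq_zero.mpr h]; rfl
      rw [hgd, if_pos (by simp)]
      have : (l ++ [a]).count a = l.count a + 1 := by
        simp [List.count_append]
      rw [this]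
      norm_cast
    · rw [if_neg hax, ih]
      have hcnt : (l ++ [x]).count a = l.count a := by
        simp [List.count_append, List.count_singleton, beq_false_of_ne (fun h : x = a => hax h.symm)]
      have hmem : (a ∈ l ++ [x]) ↔ a ∈ l := by simp [hax]
      rw [hcnt]
      simp only [hmem]

theorem pv_counts_getD (l : List String) (a : String) :
    (l.foldl stepCount PySem.Dict.empty).getD a 0 = ((l.count a : Nat) : Int) := by
  unfold PySem.Dict.getD
  rw [pv_counts_get]
  split
  · rfl
  · next h => rw [List.count_eq_zero.mpr h]; rfl

-- ---- A's outer loop computes pvG at every position ----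

theorem pv_group_fold (ns : List String) (hpre : ∀ a ∈ ns, pvLS (ns.count a) < 5) :
    ∀ (L : List String), (∀ a ∈ L, a ∈ ns) →
      ∀ j, j < ns.length →
        ((L.map (fun a => (a, pvIdxs ns a))).foldl (stepGroup (ns.zipIdx.foldl stepCollect PySem.Dict.empty))
            (List.replicate ns.length none))[j]? =
          some (if ns.getD j "" ∈ L then some (pvG ns j) else none) := by
  intro L
  induction L using List.reverseRecOn with
  | nil =>
    intro _ j hj
    simp [List.getElem?_replicate, hj]
  | append_singleton L a ihL =>
    intro hsub j hj
    have hsubL : ∀ b ∈ L, b ∈ ns := fun b hb => hsub b (List.mem_append_left _ hb)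
    have ha : a ∈ ns := hsub a (by simp)
    rw [List.map_append, List.foldl_append]
    simp only [List.map_cons, List.map_nil, List.foldl_cons, List.foldl_nil]
    have hlen : ((L.map (fun a => (a, pvIdxs ns a))).foldl
        (stepGroup (ns.zipIdx.foldl stepCollect PySem.Dict.empty)) (List.replicate ns.length none)).length
        = ns.length := by
      rw [pv_group_fold_len, List.length_replicate]
    set nnp := (L.map (fun a => (a, pvIdxs ns a))).foldl
        (stepGroup (ns.zipIdx.foldl stepCollect PySem.Dict.empty)) (List.replicate ns.length none) with hnnp
    have hIH : ∀ j', j' < ns.length →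
        nnp[j']? = some (if ns.getD j' "" ∈ L then some (pvG ns j') else none) :=
      fun j' h => ihL hsubL j' h
    have hgdj : ns.getD j "" = ns[j]'hj := by
      rw [List.getD_eq_getElem?_getD, List.getElem?_eq_getElem hj]; rfl
    by_cases hc1 : ns.count a = 1
    · -- singleton group: A writes the bare key at its single index
      have hvl : (pvIdxs ns a).length = 1 := by rw [pv_idxs_len]; exact hc1
      obtain ⟨j0, hj0⟩ := List.length_eq_one_iff.mp hvl
      have hj0mem : j0 ∈ pvIdxs ns a := by rw [hj0]; exact List.mem_cons_self
      have hns0 : ns[j0]? = some a := (pv_idxs_mem ns a j0).mp hj0mem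
      have hj0lt : j0 < ns.length := (List.getElem?_eq_some_iff.mp hns0).1
      have hstep : stepGroup (ns.zipIdx.foldl stepCollect PySem.Dict.empty) nnp (a, pvIdxs ns a) =
          nnp.set j0 (some a) := by
        rw [stepGroup.eq_def]
        dsimp only
        rw [hj0]
        simp
      rw [hstep]
      by_cases hjj : j = j0
      · subst hjj
        rw [List.getElem?_set_self (by rw [hlen]; exact hj)]
        have hgda : ns.getD j "" = a := by
          rw [List.getD_eq_getElem?_getD, hns0]; rfl
        have hga : pvG ns j = a := by
          unfold pvG
          rw [hgda, if_pos hc1]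
        rw [hgda, hga]
        simp
      · rw [List.getElem?_set_ne (fun h => hjj h.symm)]
        rw [hIH j hj]
        have hiff : (ns.getD j "" ∈ L ++ [a]) ↔ ns.getD j "" ∈ L := by
          constructor
          · intro h
            rcases List.mem_append.mp h with h | h
            · exact h
            · exfalso
              have hgda : ns.getD j "" = a := by simpa using h
              have hjmem : j ∈ pvIdxs ns a := by
                apply (pv_idxs_mem ns a j).mpr
                rw [List.getElem?_eq_getElem hj, ← hgdj, hgda]
              rw [hj0] at hjmem
              simp at hjmem
              exact hjj hjmem
          · exact fun h => List.mem_append_left _ h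
        simp only [hiff]
    · -- real group: A writes newkey+str(i) along the index list
      have hvl : (pvIdxs ns a).length = ns.count a := pv_idxs_len ns a
      have hls : pvLS (ns.count a) < 5 := hpre a ha
      have hvl' : (((pvIdxs ns a).length : Nat) : Int) = ((ns.count a : Nat) : Int) := by
        exact_mod_cast congrArg Nat.cast hvl
      have hstep : stepGroup (ns.zipIdx.foldl stepCollect PySem.Dict.empty) nnp (a, pvIdxs ns a) =
          ((pvIdxs ns a).foldl (stepWrite (pvNK a (ns.count a))) (nnp, pvOff ns a)).1 := by
        rw [stepGroup.eq_def]
        dsimp only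
        rw [if_neg (by simp [hvl, hc1] : ¬ (((pvIdxs ns a).length == 1) = true))]
        rw [hvl']
        have hfold : PySem.Str.len (PySem.Int.toStr ((ns.count a : Nat) : Int)) = pvLS (ns.count a) := rfl
        rw [hfold]
        rw [if_neg (not_le.mpr hls)]
        have hp : (if 5 < PySem.Str.len a + pvLS (ns.count a) then
              match (ns.zipIdx.foldl stepCollect PySem.Dict.empty).get?
                  (PySem.Str.slice a (some 0) (some (5 - pvLS (ns.count a)))) with
              | some l => (PySem.Str.slice a (some 0) (some (5 - pvLS (ns.count a))), (l.length : Int))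
              | none => (PySem.Str.slice a (some 0) (some (5 - pvLS (ns.count a))), (0 : Int))
            else (a, (0 : Int))) = (pvNK a (ns.count a), pvOff ns a) := by
          by_cases h5 : 5 < PySem.Str.len a + pvLS (ns.count a)
          · rw [if_pos h5]
            have hnkeq : PySem.Str.slice a (some 0) (some (5 - pvLS (ns.count a))) =
                pvNK a (ns.count a) := by
              unfold pvNK
              rw [if_pos h5]
            rw [hnkeq, pv_get_final]
            by_cases hmem : pvNK a (ns.count a) ∈ ns
            · rw [if_pos hmem]
              show (pvNK a (ns.count a), ((pvIdxs ns (pvNK a (ns.count a))).length : Int)) = _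
              rw [pv_idxs_len]
              unfold pvOff
              rw [if_pos h5]
            · rw [if_neg hmem]
              show (pvNK a (ns.count a), (0 : Int)) = _
              unfold pvOff
              rw [if_pos h5, List.count_eq_zero.mpr hmem]
              rfl
          · rw [if_neg h5]
            unfold pvNK pvOff
            rw [if_neg h5, if_neg h5]
        rw [hp]
      rw [hstep]
      by_cases hjmem : j ∈ pvIdxs ns a
      · have hns : ns[j]? = some a := (pv_idxs_mem ns a j).mp hjmem
        have hgda : ns.getD j "" = a := by rw [List.getD_eq_getElem?_getD, hns]; rfl
        rw [pv_write_get_mem _ _ _ _ _ (pv_idxs_nodup ns a)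
            (fun v hv => by rw [hlen]; exact pv_idxs_lt ns a v hv) hjmem]
        have hidx : (pvIdxs ns a).idxOf j = (ns.take j).count a := pv_idxs_idxOf ns a j hns
        have htake : (ns.take (j + 1)).count a = (ns.take j).count a + 1 := by
          rw [List.take_add_one, hns]
          simp [List.count_append]
        have harith : pvOff ns a + (((pvIdxs ns a).idxOf j : Nat) : Int) + 1 =
            pvOff ns a + (((ns.take (j + 1)).count a : Nat) : Int) := by
          rw [hidx, htake]
          push_cast
          ring
        rw [harith]
        have hga : pvG ns j = pvNK a (ns.count a) ++
            PySem.Int.toStr (pvOff ns a + (((ns.take (j + 1)).count a : Nat) : Int)) := by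
          unfold pvG
          rw [hgda, if_neg hc1]
        rw [← hga, hgda]
        simp
      · rw [pv_write_get_notmem _ _ _ _ _ hjmem]
        rw [hIH j hj]
        have hiff : (ns.getD j "" ∈ L ++ [a]) ↔ ns.getD j "" ∈ L := by
          constructor
          · intro h
            rcases List.mem_append.mp h with h | h
            · exact h
            · exfalso
              have hgda : ns.getD j "" = a := by simpa using h
              exact hjmem ((pv_idxs_mem ns a j).mpr (by rw [List.getElem?_eq_getElem hj, ← hgdj, hgda]))
          · exact fun h => List.mem_append_left _ h
        simp only [hiff]

theorem pv_A_eq (prevname : List String) (bio : Bool)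
    (hpre : ∀ a ∈ prevname.map pvTrunc, pvLS ((prevname.map pvTrunc).count a) < 5) :
    renumber prevname bio = (List.range (prevname.map pvTrunc).length).map (pvG (prevname.map pvTrunc)) := by
  unfold renumber
  dsimp only
  set ns := prevname.map pvTrunc with hns
  have hitems : (ns.zipIdx.foldl stepCollect PySem.Dict.empty).items =
      (pvKeys ns).map (fun a => (a, pvIdxs ns a)) := by
    rw [pv_collect_items, pv_map_fst_zipIdx]
    rfl
  rw [hitems]
  apply List.ext_getElem?
  intro j
  by_cases hj : j < ns.length
  · rw [List.getElem?_map, pv_group_fold ns hpre (pvKeys ns) (fun b hb => (pv_mem_keys ns b).mp hb) j hj]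
    have hmem : ns.getD j "" ∈ pvKeys ns := by
      apply (pv_mem_keys ns _).mpr
      rw [List.getD_eq_getElem?_getD, List.getElem?_eq_getElem hj]
      exact List.getElem_mem hj
    rw [if_pos hmem]
    rw [List.getElem?_map, List.getElem?_range hj]
    rfl
  · have h1 : (((pvKeys ns).map (fun a => (a, pvIdxs ns a))).foldl
        (stepGroup (ns.zipIdx.foldl stepCollect PySem.Dict.empty)) (List.replicate ns.length none)).length = ns.length := by
      rw [pv_group_fold_len, List.length_replicate]
    rw [List.getElem?_eq_none (by simp [h1]; omega), List.getElem?_eq_none (by simp; omega)]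

-- ---- B's single pass computes pvG at every position ----

theorem pv_B_inv (ns : List String) (hpre : ∀ a ∈ ns, pvLS (ns.count a) < 5) :
    ∀ k, k ≤ ns.length →
      (((ns.take k).foldl (stepB (ns.foldl stepCount PySem.Dict.empty)) (PySem.Dict.empty, [])).2 =
          (List.range k).map (pvG ns)) ∧
      (∀ a, ((ns.take k).foldl (stepB (ns.foldl stepCount PySem.Dict.empty)) (PySem.Dict.empty, [])).1.get? a =
          if a ∈ ns.take k ∧ ns.count a ≠ 1 then some (pvOff ns a + (((ns.take k).count a : Nat) : Int)) else none) := by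
  intro k
  induction k with
  | zero =>
    intro _
    constructor
    · rfl
    · intro a; simp
  | succ k ih =>
    intro hk1
    have hklt : k < ns.length := by omega
    obtain ⟨out_eq, dict_eq⟩ := ih (by omega)
    have htake : ns.take (k + 1) = ns.take k ++ [ns[k]'hklt] := by
      rw [List.take_add_one, List.getElem?_eq_getElem hklt]
      rfl
    rw [htake, List.foldl_append, List.foldl_cons, List.foldl_nil]
    have hx : ns[k]'hklt ∈ ns := List.getElem_mem hklt
    have hgdk : ns.getD k "" = ns[k]'hklt := by
      rw [List.getD_eq_getElem?_getD, List.getElem?_eq_getElem hklt]; rfl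
    have hcx : (ns.foldl stepCount PySem.Dict.empty).getD (ns[k]'hklt) 0 =
        ((ns.count (ns[k]'hklt) : Nat) : Int) := pv_counts_getD ns _
    rw [stepB.eq_def]
    dsimp only
    rw [hcx]
    by_cases h1 : ns.count (ns[k]'hklt) = 1
    · rw [if_pos (by simp [h1] : ((((ns.count (ns[k]'hklt) : Nat) : Int)) == 1) = true)]
      constructor
      · show _ ++ [ns[k]'hklt] = _
        rw [List.range_succ, List.map_append, out_eq]
        congr 1
        have hgk : pvG ns k = ns[k]'hklt := by
          unfold pvG
          rw [hgdk, if_pos h1]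
        simp [hgk]
      · intro a
        rw [dict_eq a]
        by_cases hax : a = ns[k]'hklt
        · subst hax
          rw [if_neg (fun h => h.2 h1), if_neg (fun h => h.2 h1)]
        · have hmem : (a ∈ ns.take k ++ [ns[k]'hklt]) ↔ a ∈ ns.take k :=
            ⟨fun h => (List.mem_append.mp h).elim id
                (fun h' => absurd (by simpa using h') hax),
              fun h => List.mem_append_left _ h⟩
          have hcnt : (ns.take k ++ [ns[k]'hklt]).count a = (ns.take k).count a := by
            rw [List.count_append, List.count_singleton,
              if_neg (by simp [beq_false_of_ne (fun h : ns[k]'hklt = a => hax h.symm)])]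
            omega
          simp only [hmem, hcnt]
    · have hls : pvLS (ns.count (ns[k]'hklt)) < 5 := hpre _ hx
      rw [if_neg (by simp; exact_mod_cast h1)]
      have hfold : PySem.Str.len (PySem.Int.toStr ((ns.count (ns[k]'hklt) : Nat) : Int)) =
          pvLS (ns.count (ns[k]'hklt)) := rfl
      rw [hfold]
      rw [if_neg (not_le.mpr hls)]
      have hnkeq : (if 5 < PySem.Str.len (ns[k]'hklt) + pvLS (ns.count (ns[k]'hklt)) then
            PySem.Str.slice (ns[k]'hklt) (some 0) (some (5 - pvLS (ns.count (ns[k]'hklt))))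
          else (ns[k]'hklt)) = pvNK (ns[k]'hklt) (ns.count (ns[k]'hklt)) := by
        unfold pvNK
        rfl
      rw [hnkeq]
      have hi0 : (match ((ns.take k).foldl (stepB (ns.foldl stepCount PySem.Dict.empty)) (PySem.Dict.empty, [])).1.get? (ns[k]'hklt) with
          | some v => v
          | none => if pvNK (ns[k]'hklt) (ns.count (ns[k]'hklt)) == (ns[k]'hklt) then (0 : Int)
                    else (ns.foldl stepCount PySem.Dict.empty).getD (pvNK (ns[k]'hklt) (ns.count (ns[k]'hklt))) 0) =
          pvOff ns (ns[k]'hklt) + (((ns.take k).count (ns[k]'hklt) : Nat) : Int) := by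
        rw [dict_eq]
        by_cases hmem : ns[k]'hklt ∈ ns.take k
        · rw [if_pos ⟨hmem, h1⟩]
        · rw [if_neg (fun h => hmem h.1)]
          rw [List.count_eq_zero.mpr hmem]
          by_cases h5 : 5 < PySem.Str.len (ns[k]'hklt) + pvLS (ns.count (ns[k]'hklt))
          · rw [beq_false_of_ne (pv_nk_ne _ _ hls h5)]
            rw [if_neg (by simp)]
            rw [pv_counts_getD]
            unfold pvOff
            rw [if_pos h5]
            simp
          · have : pvNK (ns[k]'hklt) (ns.count (ns[k]'hklt)) = ns[k]'hklt := by
              unfold pvNK; rw [if_neg h5]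
            rw [this]
            rw [if_pos (by simp)]
            unfold pvOff
            rw [if_neg h5]
            simp
      rw [hi0]
      have hcnt1 : (ns.take (k + 1)).count (ns[k]'hklt) = (ns.take k).count (ns[k]'hklt) + 1 := by
        rw [htake, List.count_append]
        simp
      have harith : pvOff ns (ns[k]'hklt) + (((ns.take k).count (ns[k]'hklt) : Nat) : Int) + 1 =
          pvOff ns (ns[k]'hklt) + (((ns.take (k + 1)).count (ns[k]'hklt) : Nat) : Int) := by
        rw [hcnt1]; push_cast; ring
      have harith2 : pvOff ns (ns[k]'hklt) + (((ns.take k).count (ns[k]'hklt) : Nat) : Int) + 1 =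
          pvOff ns (ns[k]'hklt) + ((((ns.take k ++ [ns[k]'hklt]).count (ns[k]'hklt) : Nat)) : Int) := by
        rw [List.count_append]
        push_cast
        simp
        ring
      constructor
      · show _ ++ [pvNK (ns[k]'hklt) (ns.count (ns[k]'hklt)) ++ PySem.Int.toStr _] = _
        rw [List.range_succ, List.map_append, out_eq]
        congr 1
        have hgg : pvG ns k = pvNK (ns[k]'hklt) (ns.count (ns[k]'hklt)) ++
            PySem.Int.toStr (pvOff ns (ns[k]'hklt) + (((ns.take (k + 1)).count (ns[k]'hklt) : Nat) : Int)) := by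
          unfold pvG
          rw [hgdk, if_neg h1]
        simp only [List.map_cons, List.map_nil]
        rw [hgg, ← harith]
      · intro a
        rw [PySem.Dict.get?_insert]
        by_cases hax : a = ns[k]'hklt
        · subst hax
          rw [if_pos rfl]
          rw [if_pos ⟨List.mem_append_right _ (by simp), h1⟩]
          rw [harith2]
        · rw [if_neg hax, dict_eq a]
          have hmem : (a ∈ ns.take k ++ [ns[k]'hklt]) ↔ a ∈ ns.take k :=
            ⟨fun h => (List.mem_append.mp h).elim id
                (fun h' => absurd (by simpa using h') hax),
              fun h => List.mem_append_left _ h⟩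
          have hcnt : (ns.take k ++ [ns[k]'hklt]).count a = (ns.take k).count a := by
            rw [List.count_append, List.count_singleton,
              if_neg (by simp [beq_false_of_ne (fun h : ns[k]'hklt = a => hax h.symm)])]
            omega
          simp only [hmem, hcnt]

theorem pv_B_eq (prevname : List String) (bio : Bool)
    (hpre : ∀ a ∈ prevname.map pvTrunc, pvLS ((prevname.map pvTrunc).count a) < 5) :
    renumber_alt prevname bio = (List.range (prevname.map pvTrunc).length).map (pvG (prevname.map pvTrunc)) := by
  unfold renumber_alt
  dsimp only
  have h := (pv_B_inv (prevname.map pvTrunc) hpre (prevname.map pvTrunc).length le_rfl).1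
  rw [List.take_length] at h
  exact h

theorem pv_pre (prevname : List String) (bio : Bool) (h : Pre_renumber prevname bio) :
    ∀ a ∈ prevname.map pvTrunc, pvLS ((prevname.map pvTrunc).count a) < 5 := by
  intro a ha
  rcases List.mem_map.mp ha with ⟨s, hs, rfl⟩
  exact h s hs

-- ===== VERDICT (by name: the statement is the Claim_ definition above) =====
theorem renumber_spec : Claim_equal_renumber := by
  intro prevname bio _ hpre
  unfold Spec_renumber
  rw [pv_A_eq prevname bio (pv_pre prevname bio hpre), pv_B_eq prevname bio (pv_pre prevname bio hpre)]
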